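-- pv_equiv track=rewrite | github.com/MrBrantCode/unitest_baseline | mut_generate/mist_train_cf/cf_68578/solution.py | character_prefixes_count
-- ===== SOURCE A (Python) =====
-- def character_prefixes_count(s):
--     """
--     Returns a list of pairs, where each pair contains a prefix of the input string
--     and the total count of characters in all prefixes up to that point.
--
--     Args:
--     s (str): The input string.
--
--     Returns:
--     list: A list of pairs, where each pair contains a prefix and its corresponding total character count.
--     """
--     results = []
--     prefix = ""
--     total_count = 0
--     for c in s:
--         prefix += c
--         total_count += len(prefix)
--         results.append((prefix, total_count))
--     return results
-- ===== SOURCE B (Python) =====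
-- def character_prefixes_count(s):
--     """Stateless re-implementation: each pair is computed directly from the
--     index -- the prefix by slicing and the cumulative total by the closed
--     form 1+2+...+(i+1) = (i+1)*(i+2)//2."""
--     return [(s[:i + 1], (i + 1) * (i + 2) // 2) for i in range(len(s))]
-- ===== Notes on version B (the rewrite author's own statement) =====
-- stated objective: simpler
-- what changed: Replaced the accumulator-passing loop (growing prefix string and running total) by a stateless comprehension over indices that slices the prefix and computes the cumulative total with the closed form (i+1)*(i+2)//2.
import Mathlib
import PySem

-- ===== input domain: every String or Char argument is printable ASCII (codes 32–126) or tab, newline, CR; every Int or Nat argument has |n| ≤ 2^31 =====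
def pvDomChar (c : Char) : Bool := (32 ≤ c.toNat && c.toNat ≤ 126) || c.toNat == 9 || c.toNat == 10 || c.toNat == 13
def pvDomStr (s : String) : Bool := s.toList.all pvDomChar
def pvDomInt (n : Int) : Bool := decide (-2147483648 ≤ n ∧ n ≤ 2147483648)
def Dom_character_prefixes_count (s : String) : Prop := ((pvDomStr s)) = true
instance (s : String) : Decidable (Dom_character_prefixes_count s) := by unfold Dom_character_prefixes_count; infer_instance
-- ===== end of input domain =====

-- B replaces A's accumulator loop (growing prefix, running total) by a stateless
-- map over indices using slicing and the closed form (i+1)*(i+2)//2 (objective: simpler).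


-- ===== PORT A =====
-- loop body of A: prefix += c; total_count += len(prefix); results.append((prefix, total_count))
def cpcStep (acc : List Char × Int × List (String × Int)) (c : Char) :
    List Char × Int × List (String × Int) :=
  let pref := acc.1 ++ [c]
  let total := acc.2.1 + (pref.length : Int)
  (pref, total, acc.2.2 ++ [(String.ofList pref, total)])

def character_prefixes_count (s : String) : List (String × Int) :=
  (s.toList.foldl cpcStep ([], 0, [])).2.2

-- ===== PORT B =====
def character_prefixes_count_alt (s : String) : List (String × Int) :=
  (PySem.List.pyRange 0 (PySem.Str.len s) 1).map
    (fun i => (PySem.Str.slice s none (some (i + 1)),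
               PySem.Int.floordiv ((i + 1) * (i + 2)) 2))

-- ===== PRECONDITION & SPEC =====
def Spec_character_prefixes_count (s : String) (out : List (String × Int)) : Prop := out = character_prefixes_count_alt s
instance (s : String) (out : List (String × Int)) : Decidable (Spec_character_prefixes_count s out) := by unfold Spec_character_prefixes_count; infer_instance

-- ===== CLAIM (what is proved, stated in full; the proofs are below) =====
def Claim_equal_character_prefixes_count : Prop := ∀ (s : String), Dom_character_prefixes_count s → Spec_character_prefixes_count s (character_prefixes_count s)

-- ===== LEMMAS AND PROOFS =====

-- the triangular numbers, as A's running total produces them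
def pvTri : Nat → Int
  | 0 => 0
  | n + 1 => pvTri n + (n + 1)

theorem pvTri_two_mul (n : Nat) : 2 * pvTri n = (n : Int) * (n + 1) := by
  induction n with
  | zero => simp [pvTri]
  | succ k ih => simp only [pvTri]; push_cast; ring_nf; push_cast at ih; linarith

-- B's closed form equals A's running total
theorem pvTri_closed (k : Nat) :
    PySem.Int.floordiv (((k : Int) + 1) * ((k : Int) + 2)) 2 = pvTri (k + 1) := by
  rw [PySem.Int.floordiv_eq_ediv_of_pos (by norm_num)]
  have h : ((k : Int) + 1) * ((k : Int) + 2) = 2 * pvTri (k + 1) := by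
    rw [pvTri_two_mul]; push_cast; ring
  rw [h, Int.mul_ediv_cancel_left _ (by norm_num)]

-- full characterisation of A's loop state after consuming l
theorem cpc_loop_state (l : List Char) :
    l.foldl cpcStep ([], 0, []) =
      (l, pvTri l.length,
       (List.range l.length).map (fun k =>
         (String.ofList (l.take (k + 1)), pvTri (k + 1)))) := by
  induction l using List.reverseRecOn with
  | nil => simp [pvTri]
  | append_singleton l c ih =>
    rw [List.foldl_append, ih]
    simp only [cpcStep, List.foldl_cons, List.foldl_nil,
      List.length_append, List.length_singleton, List.range_succ, List.map_append,
      List.map_cons, List.map_nil]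
    refine Prod.ext rfl (Prod.ext ?_ ?_)
    · show pvTri l.length + ((l.length + 1 : Nat) : Int) = pvTri (l.length + 1)
      simp [pvTri]
    · refine congrArg₂ (· ++ ·) ?_ ?_
      · refine List.map_congr_left ?_
        intro k hk
        rw [List.mem_range] at hk
        rw [List.take_append_of_le_length (by omega)]
      · rw [List.take_of_length_le (by simp)]
        have h2 : pvTri (l.length + 1) = pvTri l.length + ((l.length : Int) + 1) := rfl
        rw [h2]
        push_cast
        ring_nf

-- ===== VERDICT (by name: the statement is the Claim_ definition above) =====
theorem character_prefixes_count_spec : Claim_equal_character_prefixes_count := by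
  intro s _
  unfold Spec_character_prefixes_count character_prefixes_count character_prefixes_count_alt
  rw [cpc_loop_state]
  have hlen : PySem.Str.len s = (s.toList.length : Int) := by simp [pysem]
  rw [hlen, PySem.List.pyRange_one]
  simp only [sub_zero, Int.toNat_natCast, List.map_map]
  refine List.map_congr_left ?_
  intro k hk
  rw [List.mem_range] at hk
  simp only [Function.comp_apply, zero_add]
  refine Prod.ext ?_ ?_
  · show String.ofList (s.toList.take (k + 1)) =
      PySem.Str.slice s none (some ((k : Int) + 1))
    have : PySem.Str.slice s none (some ((k : Int) + 1)) =
        String.ofList (PySem.List.slice s.toList none (some ((k : Int) + 1))) := by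
      simp [PySem.Str.slice]
    rw [this, PySem.List.slice_to s.toList (by positivity)]
    norm_num
  · show pvTri (k + 1) = PySem.Int.floordiv (((k : Int) + 1) * ((k : Int) + 2)) 2
    rw [pvTri_closed]
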